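-- pv_equiv track=rewrite | github.com/gregoryann/Python-Beginner-Examples | +1500 Python Challenges/Easy/Special Lists.py | is_special_array
-- ===== SOURCE A (Python) =====
-- def is_special_array(lst):
-- 	i = 0
-- 	while (i < len(lst)):
-- 		if(i % 2 == 0 and lst[i] % 2 == 0):
-- 			i += 1
-- 		elif(i % 2 != 0 and lst[i] % 2 != 0):
-- 			i += 1
-- 		else:
-- 			return False
-- ===== SOURCE B (Python) =====
-- def is_special_array(lst):
-- 	while lst:
-- 		if lst[0] % 2 != 0 or (len(lst) > 1 and lst[1] % 2 == 0):
-- 			return False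
-- 		lst = lst[2:]
-- ===== Notes on version B (the rewrite author's own statement) =====
-- stated objective: alternative
-- what changed: Replaces the index-based while loop testing i % 2 with a loop that checks and strips an (even, odd) pair of elements per step (lst = lst[2:]), so no index bookkeeping remains.
import Mathlib
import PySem

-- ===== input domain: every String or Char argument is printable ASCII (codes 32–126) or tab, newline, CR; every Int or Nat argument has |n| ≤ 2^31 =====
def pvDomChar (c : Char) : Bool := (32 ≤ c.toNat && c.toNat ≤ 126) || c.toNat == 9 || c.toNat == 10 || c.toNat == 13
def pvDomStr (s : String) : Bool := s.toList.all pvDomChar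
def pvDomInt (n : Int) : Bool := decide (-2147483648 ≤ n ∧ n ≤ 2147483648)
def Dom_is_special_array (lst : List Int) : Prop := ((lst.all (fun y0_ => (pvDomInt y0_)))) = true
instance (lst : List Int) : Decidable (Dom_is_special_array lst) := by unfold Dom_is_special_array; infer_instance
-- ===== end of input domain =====

-- B replaces A's index-counting while loop by a loop that checks and strips an (even, odd) pair of elements per step; alternative decomposition, same cost.


-- ===== PORT A =====
-- the while loop over index i; lst[i] is in range because of the loop guard
def pvAGo (lst : List Int) (i : Nat) : Option Bool :=
  if h : i < lst.length then
    if i % 2 = 0 ∧ PySem.Int.mod lst[i] 2 = 0 then pvAGo lst (i + 1)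
    else if i % 2 ≠ 0 ∧ PySem.Int.mod lst[i] 2 ≠ 0 then pvAGo lst (i + 1)
    else some false
  else none
termination_by lst.length - i

def is_special_array (lst : List Int) : Option Bool := pvAGo lst 0

-- termination helper for the port of B (lst[2:] is a strict shrink); cited by the port's decreasing_by
lemma pvSliceTwo (lst : List Int) : PySem.List.slice lst (some 2) none = lst.drop 2 := by
  have := PySem.List.slice_from_natCast lst 2
  norm_num at this
  exact this

-- ===== PORT B =====
-- lst[0]/lst[1] are only read under the emptiness / length guards, so the .getD 0 defaults never fire
def is_special_array_alt (lst : List Int) : Option Bool :=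
  if lst = [] then none
  else if PySem.Int.mod ((PySem.List.pyGet? lst 0).getD 0) 2 ≠ 0 ∨
          (1 < lst.length ∧ PySem.Int.mod ((PySem.List.pyGet? lst 1).getD 0) 2 = 0) then some false
  else is_special_array_alt (PySem.List.slice lst (some 2) none)
termination_by lst.length
decreasing_by
  rename_i h _
  rw [pvSliceTwo]
  have : lst.length ≠ 0 := fun hl => h (List.eq_nil_of_length_eq_zero hl)
  simp only [List.length_drop]
  omega

-- ===== PRECONDITION & SPEC =====
def Spec_is_special_array (lst : List Int) (out : Option Bool) : Prop := out = is_special_array_alt lst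
instance (lst : List Int) (out : Option Bool) : Decidable (Spec_is_special_array lst out) := by unfold Spec_is_special_array; infer_instance

-- ===== CLAIM (what is proved, stated in full; the proofs are below) =====
def Claim_equal_is_special_array : Prop := ∀ (lst : List Int), Dom_is_special_array lst → Spec_is_special_array lst (is_special_array lst)

-- ===== LEMMAS AND PROOFS =====

-- common specification: expected parity flag p (true = even expected), one element per step
def pvSpec (p : Bool) : List Int → Option Bool
  | [] => none
  | x :: xs => if decide (PySem.Int.mod x 2 = 0) == p then pvSpec (!p) xs else some false

lemma pvMod2 (x : Int) : PySem.Int.mod x 2 = x % 2 := by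
  simp [PySem.Int.mod, Int.fmod_eq_emod]

lemma pvAGo_eq_spec (lst : List Int) (i : Nat) :
    pvAGo lst i = pvSpec (decide (i % 2 = 0)) (lst.drop i) := by
  induction hn : lst.length - i generalizing i with
  | zero =>
    have h : ¬ i < lst.length := by omega
    rw [pvAGo]
    simp [h, List.drop_eq_nil_of_le (by omega : lst.length ≤ i), pvSpec]
  | succ n ih =>
    have h : i < lst.length := by omega
    have hd : lst.drop i = lst[i] :: lst.drop (i + 1) := List.drop_eq_getElem_cons h
    have hpar : decide ((i + 1) % 2 = 0) = !decide (i % 2 = 0) := by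
      rcases Nat.even_or_odd i with he | ho
      · have : i % 2 = 0 := Nat.even_iff.mp he
        simp [Nat.add_mod, *]
      · have : i % 2 = 1 := Nat.odd_iff.mp ho
        simp [Nat.add_mod, *]
    rw [pvAGo]
    simp only [h, dif_pos]
    by_cases hm : PySem.Int.mod lst[i] 2 = 0 <;> by_cases hp : i % 2 = 0
    · rw [if_pos ⟨hp, hm⟩, ih (i + 1) (by omega), hd, hpar]
      simp [pvSpec, hp]
      intro hco
      exact absurd hco (by rw [pvMod2] at hm; omega)
    · rw [if_neg (fun hc => hp hc.1), if_neg (fun hc => hc.2 hm), hd]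
      simp [pvSpec, hp]
      intro hco
      exact absurd hco (by rw [pvMod2] at hm; omega)
    · rw [if_neg (fun hc => hm hc.2), if_neg (fun hc => hc.1 hp), hd]
      simp [pvSpec, hp]
      intro hco
      exact absurd hco (by rw [pvMod2] at hm; omega)
    · rw [if_neg (fun hc => hp hc.1), if_pos ⟨hp, hm⟩, ih (i + 1) (by omega), hd, hpar]
      simp [pvSpec, hp]
      intro hco
      exact absurd hco (by rw [pvMod2] at hm; omega)

lemma alt_eq_spec (lst : List Int) : is_special_array_alt lst = pvSpec true lst := by
  induction hn : lst.length using Nat.strong_induction_on generalizing lst with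
  | _ n ih =>
    match lst with
    | [] =>
      unfold is_special_array_alt
      rw [if_pos rfl]
      rfl
    | [x] =>
      unfold is_special_array_alt
      rw [if_neg (by simp)]
      have hg : (PySem.List.pyGet? [x] 0).getD 0 = x := by
        norm_num [PySem.List.pyGet?, PySem.List.pyIdx?]
      by_cases hx : x % 2 = 0
      · rw [if_neg (by
          simp only [hg, pvMod2]
          push Not
          exact ⟨hx, fun h => absurd h (by norm_num)⟩)]
        rw [pvSliceTwo]
        simp only [List.drop_succ_cons, List.drop_nil]
        unfold is_special_array_alt
        rw [if_pos rfl]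
        simp [pvSpec, hx]
      · rw [if_pos (Or.inl (by rw [hg, pvMod2]; exact hx))]
        simp [pvSpec, hx]
    | x :: y :: rs =>
      unfold is_special_array_alt
      rw [if_neg (by simp)]
      have hg0 : (PySem.List.pyGet? (x :: y :: rs) 0).getD 0 = x := by
        norm_num [PySem.List.pyGet?, PySem.List.pyIdx?]
        rw [if_pos (by positivity)]
        simp
      have hg1 : (PySem.List.pyGet? (x :: y :: rs) 1).getD 0 = y := by
        norm_num [PySem.List.pyGet?, PySem.List.pyIdx?]
      by_cases hx : x % 2 = 0
      · by_cases hy : y % 2 = 0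
        · rw [if_pos (Or.inr ⟨by simp, by rw [hg1, pvMod2]; exact hy⟩)]
          simp [pvSpec, hx, hy]
        · rw [if_neg (by
            simp only [hg0, hg1, pvMod2]
            push Not
            exact ⟨hx, fun _ => hy⟩)]
          rw [pvSliceTwo]
          simp only [List.drop_succ_cons, List.drop_zero]
          have hlt : rs.length < n := by simp at hn; omega
          rw [ih rs.length hlt rs rfl]
          simp [pvSpec, hx, hy]
      · rw [if_pos (Or.inl (by rw [hg0, pvMod2]; exact hx))]
        simp [pvSpec, hx]

-- ===== VERDICT (by name: the statement is the Claim_ definition above) =====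
theorem is_special_array_spec : Claim_equal_is_special_array := by
  intro lst _
  unfold Spec_is_special_array is_special_array
  rw [pvAGo_eq_spec, alt_eq_spec]
  simp
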